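-- pv_equiv track=rewrite | github.com/yuesuLi/RadarRGBFusionNetFinal | Track/linear_assignment.py | k_previous_obs
-- ===== SOURCE A (Python) =====
-- def k_previous_obs(observations, cur_age, k):
--     if len(observations) == 0:
--         return [-100, -100, -1]
--     for i in range(k):
--         dt = k - i
--         if cur_age - dt in observations:
--             return observations[cur_age-dt]
--     max_age = max(observations.keys())
--     return observations[max_age]    # (x, y, c)
-- ===== SOURCE B (Python) =====
-- def k_previous_obs(observations, cur_age, k):
--     if len(observations) == 0:
--         return [-100, -100, -1]
--     cands = [age for age in observations if cur_age - k <= age <= cur_age - 1]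
--     if cands:
--         return observations[min(cands)]
--     return observations[max(observations.keys())]
-- ===== Notes on version B (the rewrite author's own statement) =====
-- stated objective: simpler
-- what changed: Instead of probing k fixed offsets cur_age-k..cur_age-1 one by one with an early return, B filters the dict's existing keys to the window [cur_age-k, cur_age-1] and looks up its minimum, keeping the same max-key fallback; cost depends on the number of keys rather than on k.
import Mathlib
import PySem

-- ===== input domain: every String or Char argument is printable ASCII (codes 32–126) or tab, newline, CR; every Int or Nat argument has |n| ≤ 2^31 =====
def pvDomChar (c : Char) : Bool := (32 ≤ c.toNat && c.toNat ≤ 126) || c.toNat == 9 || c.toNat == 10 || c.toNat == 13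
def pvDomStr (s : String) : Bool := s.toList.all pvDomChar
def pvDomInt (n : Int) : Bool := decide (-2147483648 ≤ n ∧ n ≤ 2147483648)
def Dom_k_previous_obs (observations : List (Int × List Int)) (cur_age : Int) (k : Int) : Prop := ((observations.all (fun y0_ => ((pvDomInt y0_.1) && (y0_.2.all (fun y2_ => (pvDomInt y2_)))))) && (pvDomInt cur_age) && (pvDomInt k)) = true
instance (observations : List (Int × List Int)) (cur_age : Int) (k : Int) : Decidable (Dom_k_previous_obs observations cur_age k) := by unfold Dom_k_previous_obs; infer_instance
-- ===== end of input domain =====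

-- B replaces A's probe of k fixed offsets (largest dt first, early return) by a filter of the
-- dict's keys to the window [cur_age-k, cur_age-1] and a lookup of its minimum; same max-key fallback.

-- ===== PORT A =====
-- the `max(observations.keys())` fallback (dict is nonempty whenever it is reached)
def kprevFallback (d : PySem.Dict Int (List Int)) : List Int :=
  match PySem.List.max? (PySem.Dict.keys d) (fun x => x) with
  | some m => PySem.Dict.getD d m []
  | none => []

-- the `for i in range(k)` loop with its early return
def kprevLoop (d : PySem.Dict Int (List Int)) (cur_age k : Int) : List Int → List Int
  | [] => kprevFallback d
  | i :: rest =>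
    let dt := k - i
    if PySem.Dict.contains d (cur_age - dt) then PySem.Dict.getD d (cur_age - dt) []
    else kprevLoop d cur_age k rest

def k_previous_obs (observations : List (Int × List Int)) (cur_age : Int) (k : Int) : List Int :=
  if observations.length = 0 then [-100, -100, -1]
  else kprevLoop (PySem.Dict.mk observations) cur_age k (PySem.List.pyRange 0 k 1)

-- ===== PORT B =====
def k_previous_obs_alt (observations : List (Int × List Int)) (cur_age : Int) (k : Int) : List Int :=
  if observations.length = 0 then [-100, -100, -1]
  else
    let d := PySem.Dict.mk observations
    let cands := (PySem.Dict.keys d).filter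
      (fun age => decide (cur_age - k ≤ age) && decide (age ≤ cur_age - 1))
    match PySem.List.min? cands (fun x => x) with
    | some m => PySem.Dict.getD d m []
    | none =>
      match PySem.List.max? (PySem.Dict.keys d) (fun x => x) with
      | some m => PySem.Dict.getD d m []
      | none => []

-- ===== PRECONDITION & SPEC =====
def Spec_k_previous_obs (observations : List (Int × List Int)) (cur_age : Int) (k : Int) (out : List Int) : Prop := out = k_previous_obs_alt observations cur_age k
instance (observations : List (Int × List Int)) (cur_age : Int) (k : Int) (out : List Int) : Decidable (Spec_k_previous_obs observations cur_age k out) := by unfold Spec_k_previous_obs; infer_instance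

-- ===== CLAIM (what is proved, stated in full; the proofs are below) =====
def Claim_equal_k_previous_obs : Prop := ∀ (observations : List (Int × List Int)) (cur_age : Int) (k : Int), Dom_k_previous_obs observations cur_age k → Spec_k_previous_obs observations cur_age k (k_previous_obs observations cur_age k)

-- ===== LEMMAS AND PROOFS =====

-- probe a list of candidate keys in order, early-returning on the first present one
def kprevProbe (d : PySem.Dict Int (List Int)) : List Int → List Int
  | [] => kprevFallback d
  | x :: rest =>
    if PySem.Dict.contains d x then PySem.Dict.getD d x []
    else kprevProbe d rest

theorem kprevLoop_eq_probe (d : PySem.Dict Int (List Int)) (c k : Int) (is : List Int) :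
    kprevLoop d c k is = kprevProbe d (is.map (fun i => c - (k - i))) := by
  induction is with
  | nil => rfl
  | cons i rest ih => simp [kprevLoop, kprevProbe, ih]

theorem kprevProbe_eq_filter (d : PySem.Dict Int (List Int)) (ks : List Int) :
    kprevProbe d ks =
      match ks.filter (fun x => PySem.Dict.contains d x) with
      | [] => kprevFallback d
      | m :: _ => PySem.Dict.getD d m [] := by
  induction ks with
  | nil => rfl
  | cons x rest ih =>
    by_cases h : PySem.Dict.contains d x
    · simp [kprevProbe, h]
    · simp only [kprevProbe, List.filter_cons]
      simp [h, ih]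

theorem kprev_keys_map (c k : Int) :
    (PySem.List.pyRange 0 k 1).map (fun i => c - (k - i)) = PySem.List.pyRange (c - k) c 1 := by
  rw [PySem.List.pyRange_one 0 k, PySem.List.pyRange_one (c - k) c]
  have h : (k - 0).toNat = (c - (c - k)).toNat := by omega
  rw [← h, List.map_map]
  apply List.map_congr_left
  intro a _
  simp
  omega

theorem k_previous_obs_spec : Claim_equal_k_previous_obs := by
  intro observations c k _
  unfold Spec_k_previous_obs k_previous_obs k_previous_obs_alt
  by_cases hemp : observations.length = 0
  · simp [hemp]
  · simp only [hemp, if_false]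
    rw [kprevLoop_eq_probe, kprev_keys_map, kprevProbe_eq_filter]
    have memF : ∀ x : Int,
        x ∈ (PySem.List.pyRange (c - k) c 1).filter
            (fun x => PySem.Dict.contains (PySem.Dict.mk observations) x) ↔
          (c - k ≤ x ∧ x ≤ c - 1) ∧ x ∈ PySem.Dict.keys (PySem.Dict.mk observations) := by
      intro x
      simp [List.mem_filter, PySem.List.mem_pyRange_one]
    have memC : ∀ x : Int,
        x ∈ (PySem.Dict.keys (PySem.Dict.mk observations)).filter
            (fun age => decide (c - k ≤ age) && decide (age ≤ c - 1)) ↔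
          (c - k ≤ x ∧ x ≤ c - 1) ∧ x ∈ PySem.Dict.keys (PySem.Dict.mk observations) := by
      intro x
      simp [List.mem_filter]
      tauto
    cases hFm : (PySem.List.pyRange (c - k) c 1).filter
        (fun x => PySem.Dict.contains (PySem.Dict.mk observations) x) with
    | nil =>
      have hcnil : (PySem.Dict.keys (PySem.Dict.mk observations)).filter
          (fun age => decide (c - k ≤ age) && decide (age ≤ c - 1)) = [] := by
        rw [List.eq_nil_iff_forall_not_mem]
        intro x hx
        have hmem := (memF x).mpr ((memC x).mp hx)
        rw [hFm] at hmem
        simp at hmem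
      rw [hcnil]
      simp [PySem.List.min?, kprevFallback]
    | cons m rest =>
      have hmemMR : ∀ y : Int, y ∈ m :: rest ↔
          (c - k ≤ y ∧ y ≤ c - 1) ∧ y ∈ PySem.Dict.keys (PySem.Dict.mk observations) := by
        intro y; rw [← hFm]; exact memF y
      have hp : (m :: rest).Pairwise (· < ·) := by
        rw [← hFm]
        exact List.Pairwise.filter _ (PySem.List.pairwise_lt_pyRange_one (c - k) c)
      have hmin : ∀ y ∈ m :: rest, m ≤ y := by
        intro y hy
        rcases List.mem_cons.mp hy with h | h
        · exact le_of_eq h.symm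
        · exact le_of_lt ((List.pairwise_cons.mp hp).1 y h)
      have hmC : m ∈ (PySem.Dict.keys (PySem.Dict.mk observations)).filter
          (fun age => decide (c - k ≤ age) && decide (age ≤ c - 1)) :=
        (memC m).mpr ((hmemMR m).mp List.mem_cons_self)
      have hminC : ∀ y ∈ (PySem.Dict.keys (PySem.Dict.mk observations)).filter
          (fun age => decide (c - k ≤ age) && decide (age ≤ c - 1)), m ≤ y := fun y hy =>
        hmin y ((hmemMR y).mpr ((memC y).mp hy))
      obtain ⟨v, hv⟩ : ∃ v, PySem.List.min? ((PySem.Dict.keys (PySem.Dict.mk observations)).filter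
          (fun age => decide (c - k ≤ age) && decide (age ≤ c - 1))) (fun x => x) = some v := by
        cases hvv : PySem.List.min? ((PySem.Dict.keys (PySem.Dict.mk observations)).filter
            (fun age => decide (c - k ≤ age) && decide (age ≤ c - 1))) (fun x => x) with
        | none =>
          rw [PySem.List.min?_eq_none_iff] at hvv
          rw [hvv] at hmC; simp at hmC
        | some v => exact ⟨v, rfl⟩
      have hvm : v = m := by
        have h1 := PySem.List.min?_mem hv
        have h2 := PySem.List.min?_isMin hv
        exact le_antisymm (h2 m hmC) (hminC v h1)
      rw [hv, hvm]

-- ===== VERDICT (by name: the statement is the Claim_ definition above) =====
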